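-- pv_equiv track=rewrite | github.com/yangjaehyuk/Programmers | Lv.2/귤 고르기.py | solution
-- ===== SOURCE A (Python) =====
-- from collections import Counter
--
-- def solution(k, tangerine):
--     cnt=Counter(tangerine)
--     cnt=sorted(cnt.items(), key=lambda x:(-x[1],x[0]))
--     count=0
--     v=[]
--     for key, value in cnt:
--         v.append(value)
--     mv=max(v)
--     if mv>k:
--         count=1
--     else:
--         for i in range(len(v)):
--             k-=v[i]
--             count+=1
--             if k<=0:
--                 break
--     return count
-- ===== SOURCE B (Python) =====
-- from collections import Counter
--
-- def solution(k, tangerine):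
--     cnt = Counter(tangerine)              # kind -> how many tangerines of that size
--     mult = Counter(cnt.values())          # count value -> how many kinds occur exactly that often
--     kinds = 0
--     for c in range(len(tangerine), 0, -1):    # counting-sort walk over possible counts, largest first
--         for _ in range(mult.get(c, 0)):
--             k -= c
--             kinds += 1
--             if k <= 0:
--                 return kinds
--     return kinds
-- ===== Notes on version B (the rewrite author's own statement) =====
-- stated objective: alternative
-- what changed: B replaces A's comparison sort of the (count, kind) items and the separate max() pass by a Counter-of-counts plus a counting-sort walk over the possible count values (bounded by len(tangerine)), greedily accumulating in the same descending-count order.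
import Mathlib
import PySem

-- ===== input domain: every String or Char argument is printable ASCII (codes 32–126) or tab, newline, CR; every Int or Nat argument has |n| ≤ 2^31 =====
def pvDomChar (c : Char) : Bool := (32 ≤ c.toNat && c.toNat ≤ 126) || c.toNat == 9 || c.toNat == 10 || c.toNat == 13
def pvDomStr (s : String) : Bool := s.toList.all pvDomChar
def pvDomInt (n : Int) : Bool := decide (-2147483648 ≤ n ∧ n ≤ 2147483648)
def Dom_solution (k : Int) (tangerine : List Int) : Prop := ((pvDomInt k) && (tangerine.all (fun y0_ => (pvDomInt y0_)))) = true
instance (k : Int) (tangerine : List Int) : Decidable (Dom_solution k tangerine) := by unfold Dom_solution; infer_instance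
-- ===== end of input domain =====

-- B replaces A's comparison sort of the counts by a counting-sort walk over the
-- possible count values (bounded by len(tangerine)), keeping the same greedy
-- accumulation; equivalence of the return values is proved on nonempty input.

-- ===== PORT A =====
-- the 'for i in range(len(v)): k -= v[i]; count += 1; if k <= 0: break' loop of A
def solnLoopA : List Int → Int → Int → Int
  | [], _, count => count
  | x :: rest, k, count =>
    let k' := k - x
    let count' := count + 1
    if k' ≤ 0 then count' else solnLoopA rest k' count'

def solution (k : Int) (tangerine : List Int) : Int :=
  let cnt := PySem.Dict.counter tangerine
  let cntS := PySem.List.sorted2 cnt.items (fun x => -x.2) (fun x => x.1)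
  let v := cntS.foldl (fun acc p => acc ++ [p.2]) ([] : List Int)
  match PySem.List.max? v (fun y => y) with
  | none => 0   -- Python's max([]) raises ValueError here; excluded by Pre_solution
  | some mv => if mv > k then 1 else solnLoopA v k 0

-- ===== PORT B =====
-- the inner 'for _ in range(mult.get(c, 0)): k -= c; kinds += 1; if k <= 0: return kinds' loop
def solnInnerB (c : Int) : Nat → Int → Int → Int × Int × Bool
  | 0, k, kinds => (k, kinds, false)
  | r+1, k, kinds =>
    let k' := k - c
    let kinds' := kinds + 1
    if k' ≤ 0 then (k', kinds', true) else solnInnerB c r k' kinds'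

-- the outer 'for c in range(len(tangerine), 0, -1)' loop (early return threaded as a Bool)
def solnOuterB (mult : PySem.Dict Int Int) : List Int → Int → Int → Int
  | [], _, kinds => kinds
  | c :: cs, k, kinds =>
    match solnInnerB c (mult.getD c 0).toNat k kinds with
    | (k', kinds', done) => if done then kinds' else solnOuterB mult cs k' kinds'

def solution_alt (k : Int) (tangerine : List Int) : Int :=
  let cnt := PySem.Dict.counter tangerine
  let mult := PySem.Dict.counter cnt.values
  solnOuterB mult (PySem.List.pyRange (tangerine.length : Int) 0 (-1)) k 0

-- ===== PRECONDITION & SPEC =====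
-- Pre_ excludes only the empty list, on which A raises ValueError (max of an empty sequence).
def Pre_solution (k : Int) (tangerine : List Int) : Prop := tangerine ≠ []
instance (k : Int) (tangerine : List Int) : Decidable (Pre_solution k tangerine) := by unfold Pre_solution; infer_instance
def pvWitness_solution : Int × List Int := (6, [1, 2, 2, 3])

def Spec_solution (k : Int) (tangerine : List Int) (out : Int) : Prop := out = solution_alt k tangerine
instance (k : Int) (tangerine : List Int) (out : Int) : Decidable (Spec_solution k tangerine out) := by unfold Spec_solution; infer_instance

-- ===== CLAIM (what is proved, stated in full; the proofs are below) =====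
def Claim_equal_solution : Prop := ∀ (k : Int) (tangerine : List Int), Dom_solution k tangerine → Pre_solution k tangerine → Spec_solution k tangerine (solution k tangerine)

-- ===== LEMMAS AND PROOFS =====

-- the single Int key that realises A's lexicographic key (-count, kind) on Dom-bounded kinds
def solnCombKey (p : Int × Int) : Int := (-p.2) * 8589934592 + p.1

-- B's traversal order of the counts: each count value c from n down to 1, repeated
-- once per kind that occurs exactly c times
def solnDesc (t : List Int) : List Int :=
  (PySem.List.pyRange (t.length : Int) 0 (-1)).flatMap
    (fun c => List.replicate (((PySem.Dict.counter (PySem.Dict.counter t).values).getD c 0).toNat) c)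

-- A's traversal order of the counts: values of the sorted items list
def solnVA (t : List Int) : List Int :=
  (PySem.List.sorted (PySem.Dict.counter t).items solnCombKey).map (·.2)

lemma insertBy_congr {α : Type} (b b' : α → α → Bool) (x : α) :
    ∀ ys : List α, (∀ y ∈ ys, b x y = b' x y) →
      PySem.List.insertBy b x ys = PySem.List.insertBy b' x ys := by
  intro ys
  induction ys with
  | nil => intro _; rfl
  | cons y ys ih =>
    intro h
    rw [show PySem.List.insertBy b x (y :: ys)
          = if b x y then x :: y :: ys else y :: PySem.List.insertBy b x ys from rfl,
        show PySem.List.insertBy b' x (y :: ys)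
          = if b' x y then x :: y :: ys else y :: PySem.List.insertBy b' x ys from rfl,
        h y (by simp), ih (fun z hz => h z (by simp [hz]))]

lemma foldl_insertBy_congr {α : Type} (b b' : α → α → Bool) (S : List α)
    (hbb : ∀ a ∈ S, ∀ c ∈ S, b a c = b' a c) :
    ∀ (xs acc : List α), (∀ x ∈ xs, x ∈ S) → (∀ y ∈ acc, y ∈ S) →
      xs.foldl (fun acc x => PySem.List.insertBy b x acc) acc
        = xs.foldl (fun acc x => PySem.List.insertBy b' x acc) acc := by
  intro xs
  induction xs with
  | nil => intro acc _ _; rfl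
  | cons x xs ih =>
    intro acc hxs hacc
    simp only [List.foldl_cons]
    rw [insertBy_congr b b' x acc (fun y hy => hbb x (hxs x (by simp)) y (hacc y hy))]
    refine ih _ (fun z hz => hxs z (by simp [hz])) (fun y hy => ?_)
    rcases (PySem.List.mem_insertBy b' x y acc).1 hy with h | h
    · exact h ▸ hxs x (by simp)
    · exact hacc y h

lemma solnBefore_eq (a b : Int × Int)
    (ha : -2147483648 ≤ a.1 ∧ a.1 ≤ 2147483648) (hb : -2147483648 ≤ b.1 ∧ b.1 ≤ 2147483648) :
    (decide ((-a.2 : Int) < -b.2) || (!decide ((-b.2 : Int) < -a.2) && decide (a.1 < b.1)))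
      = decide (solnCombKey a < solnCombKey b) := by
  obtain ⟨a1, a2⟩ := a
  obtain ⟨b1, b2⟩ := b
  simp only [solnCombKey] at *
  by_cases h1 : (-a2 : Int) < -b2 <;> by_cases h2 : (-b2 : Int) < -a2 <;>
    by_cases h3 : (a1 : Int) < b1 <;> simp [h1, h2, h3] <;> omega

-- every item of Counter(t) has a Dom-bounded key
lemma items_key_bound (t : List Int) (hd : ∀ y ∈ t, -2147483648 ≤ y ∧ y ≤ 2147483648) :
    ∀ p ∈ (PySem.Dict.counter t).items, -2147483648 ≤ p.1 ∧ p.1 ≤ 2147483648 := by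
  intro p hp
  rw [PySem.Dict.items_counter] at hp
  obtain ⟨q, hq, rfl⟩ := List.mem_map.1 hp
  exact hd q ((PySem.Set.mem_ofList t q).1 hq)

lemma sorted2_eq_sorted_comb (t : List Int)
    (hd : ∀ y ∈ t, -2147483648 ≤ y ∧ y ≤ 2147483648) :
    PySem.List.sorted2 (PySem.Dict.counter t).items (fun x => -x.2) (fun x => x.1)
      = PySem.List.sorted (PySem.Dict.counter t).items solnCombKey := by
  simp only [PySem.List.sorted2, PySem.List.sorted, if_neg (by decide : ¬ (false = true))]
  exact foldl_insertBy_congr _ _ (PySem.Dict.counter t).items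
    (fun a ha c hc => solnBefore_eq a c (items_key_bound t hd a ha) (items_key_bound t hd c hc))
    _ [] (fun x hx => hx) (by simp)

-- every value of Counter(t) is a count: a Nat between 1 and len t
lemma values_bound (t : List Int) :
    ∀ v ∈ (PySem.Dict.counter t).values, ∃ m : Nat, v = (m : Int) ∧ 1 ≤ m ∧ m ≤ t.length := by
  intro v hv
  simp only [PySem.Dict.values, PySem.Dict.items_counter, List.map_map, List.mem_map] at hv
  obtain ⟨q, hq, rfl⟩ := hv
  exact ⟨t.count q, rfl, List.count_pos_iff.2 ((PySem.Set.mem_ofList t q).1 hq), List.count_le_length⟩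

lemma sum_ite_single (x : Int) (g : Int → Nat) :
    ∀ l : List Int, l.Nodup →
      (l.map (fun c => if c = x then g c else 0)).sum = if x ∈ l then g x else 0 := by
  intro l
  induction l with
  | nil => simp
  | cons c l ih =>
    intro hnd
    simp only [List.map_cons, List.sum_cons, ih hnd.tail, List.mem_cons]
    by_cases hc : c = x
    · subst hc
      simp [List.nodup_cons.1 hnd |>.1]
    · simp [hc, Ne.symm hc]

lemma pairwise_ge_flatMap (g : Int → Nat) :
    ∀ l : List Int, l.Pairwise (fun a b => b < a) →
      (l.flatMap fun c => List.replicate (g c) c).Pairwise (· ≥ ·) := by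
  intro l
  induction l with
  | nil => simp
  | cons c l ih =>
    intro h
    rw [List.flatMap_cons, List.pairwise_append]
    refine ⟨List.pairwise_replicate.2 (Or.inr le_rfl), ih h.tail, ?_⟩
    intro a ha b hb
    obtain rfl := List.eq_of_mem_replicate ha
    obtain ⟨c', hc', hb'⟩ := List.mem_flatMap.1 hb
    obtain rfl := List.eq_of_mem_replicate hb'
    exact le_of_lt (List.rel_of_pairwise_cons h hc')

lemma solnDesc_perm_values (t : List Int) :
    (solnDesc t).Perm (PySem.Dict.counter t).values := by
  rw [List.perm_iff_count]
  intro a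
  have hnd : (PySem.List.pyRange (t.length : Int) 0 (-1)).Nodup := by
    rw [PySem.List.pyRange_neg_one_eq_reverse]
    exact List.nodup_reverse.2 (PySem.List.nodup_pyRange_one _ _)
  unfold solnDesc
  rw [List.count_flatMap]
  have hmap : List.map (List.count a ∘ fun c =>
        List.replicate (((PySem.Dict.counter (PySem.Dict.counter t).values).getD c 0).toNat) c)
        (PySem.List.pyRange (t.length : Int) 0 (-1))
      = (PySem.List.pyRange (t.length : Int) 0 (-1)).map
          (fun c => if c = a then (PySem.Dict.counter t).values.count c else 0) := by
    refine List.map_congr_left (fun c _ => ?_)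
    simp [List.count_replicate, PySem.Dict.getD_counter]
  rw [hmap, sum_ite_single a _ _ hnd]
  by_cases hmem : a ∈ PySem.List.pyRange (t.length : Int) 0 (-1)
  · simp [hmem]
  · rw [if_neg hmem]
    symm
    rw [List.count_eq_zero]
    intro hav
    obtain ⟨m, rfl, h1, h2⟩ := values_bound t a hav
    exact hmem (PySem.List.mem_pyRange_neg_one.2 ⟨by exact_mod_cast h1, by exact_mod_cast h2⟩)

lemma solnVA_perm_values (t : List Int) :
    (solnVA t).Perm (PySem.Dict.counter t).values := by
  have h := (PySem.List.sorted_perm (PySem.Dict.counter t).items solnCombKey false).map (fun p : Int × Int => p.2)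
  simpa [solnVA, PySem.Dict.values] using h

lemma solnDesc_pairwise (t : List Int) : (solnDesc t).Pairwise (· ≥ ·) := by
  unfold solnDesc
  apply pairwise_ge_flatMap
  rw [PySem.List.pyRange_neg_one_eq_reverse]
  exact List.pairwise_reverse.2 (by simpa using PySem.List.pairwise_lt_pyRange_one _ _)

lemma solnVA_pairwise (t : List Int)
    (hd : ∀ y ∈ t, -2147483648 ≤ y ∧ y ≤ 2147483648) :
    (solnVA t).Pairwise (· ≥ ·) := by
  unfold solnVA
  rw [List.pairwise_map]
  refine (PySem.List.sorted_pairwise (PySem.Dict.counter t).items solnCombKey).imp_of_mem ?_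
  intro a b ha hb hle
  have hba := items_key_bound t hd a ((PySem.List.mem_sorted _ _ _ _).1 ha)
  have hbb := items_key_bound t hd b ((PySem.List.mem_sorted _ _ _ _).1 hb)
  simp only [solnCombKey] at hle
  omega

lemma solnVA_eq_solnDesc (t : List Int)
    (hd : ∀ y ∈ t, -2147483648 ≤ y ∧ y ≤ 2147483648) :
    solnVA t = solnDesc t := by
  exact List.Perm.eq_of_pairwise (le := fun a b : Int => a ≥ b)
    (fun a b _ _ h1 h2 => by omega) (solnVA_pairwise t hd) (solnDesc_pairwise t)
    ((solnVA_perm_values t).trans (solnDesc_perm_values t).symm)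

lemma innerB_loopA (c : Int) :
    ∀ (r : Nat) (k kinds : Int) (rest : List Int),
      solnLoopA (List.replicate r c ++ rest) k kinds =
        (match solnInnerB c r k kinds with
         | (k', kinds', done) => if done then kinds' else solnLoopA rest k' kinds') := by
  intro r
  induction r with
  | zero => intro k kinds rest; simp [solnInnerB]
  | succ r ih =>
    intro k kinds rest
    simp only [List.replicate_succ, List.cons_append, solnLoopA, solnInnerB]
    by_cases hk : k - c ≤ 0
    · simp [hk]
    · simp [hk, ih]

lemma outerB_loopA (mult : PySem.Dict Int Int) :
    ∀ (cs : List Int) (k kinds : Int),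
      solnOuterB mult cs k kinds
        = solnLoopA (cs.flatMap fun c => List.replicate ((mult.getD c 0).toNat) c) k kinds := by
  intro cs
  induction cs with
  | nil => intro k kinds; simp [solnOuterB, solnLoopA]
  | cons c cs ih =>
    intro k kinds
    simp only [solnOuterB, List.flatMap_cons]
    rw [innerB_loopA]
    rcases hin : solnInnerB c ((mult.getD c 0).toNat) k kinds with ⟨k', kinds', done⟩
    cases done <;> simp [ih]

lemma solution_alt_eq_loopA (k : Int) (t : List Int) :
    solution_alt k t = solnLoopA (solnDesc t) k 0 := by
  unfold solution_alt solnDesc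
  rw [outerB_loopA]

lemma solution_eq_loopA (k : Int) (t : List Int) (hne : t ≠ [])
    (hd : ∀ y ∈ t, -2147483648 ≤ y ∧ y ≤ 2147483648) :
    solution k t = solnLoopA (solnVA t) k 0 := by
  simp only [solution]
  rw [sorted2_eq_sorted_comb t hd]
  have hv : (PySem.List.sorted (PySem.Dict.counter t).items solnCombKey).foldl
      (fun acc p => acc ++ [p.2]) [] = solnVA t := by
    simpa [solnVA] using
      PySem.List.foldl_append_singleton_eq_map (fun p : Int × Int => p.2)
        (PySem.List.sorted (PySem.Dict.counter t).items solnCombKey) []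
  rw [hv]
  have hne' : solnVA t ≠ [] := by
    unfold solnVA
    simp only [ne_eq, List.map_eq_nil_iff, PySem.List.sorted_eq_nil_iff]
    intro hit
    obtain ⟨a, t', rfl⟩ := List.exists_cons_of_ne_nil hne
    have ha : a ∈ PySem.Set.ofList (a :: t') := (PySem.Set.mem_ofList _ _).2 (by simp)
    rw [← PySem.Dict.keys_counter] at ha
    simp [PySem.Dict.keys, hit] at ha
  rcases hmax : PySem.List.max? (solnVA t) (fun y => y) with _ | mv
  · exact absurd ((PySem.List.max?_eq_none_iff _ _).1 hmax) hne'
  · simp only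
    by_cases hgt : mv > k
    · rw [if_pos hgt]
      obtain ⟨h, tl, hvt⟩ := List.exists_cons_of_ne_nil hne'
      have hmem := PySem.List.max?_mem hmax
      have hmax' := PySem.List.max?_isMax hmax
      have hpw := solnVA_pairwise t hd
      rw [hvt] at hmem hmax' hpw ⊢
      have hhm : h = mv := by
        rcases List.mem_cons.1 hmem with rfl | hmv
        · rfl
        · have h1 := List.rel_of_pairwise_cons hpw hmv
          have h2 := hmax' h (by simp)
          simp only at h2
          omega
      simp [solnLoopA, show k - h ≤ 0 by omega]
    · rw [if_neg hgt]

-- ===== VERDICT (by name: the statement is the Claim_ definition above) =====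
theorem solution_spec : Claim_equal_solution := by
  intro k t hdom hpre
  unfold Spec_solution
  have hd : ∀ y ∈ t, -2147483648 ≤ y ∧ y ≤ 2147483648 := by
    unfold Dom_solution at hdom
    simp only [Bool.and_eq_true, List.all_eq_true, pvDomInt, decide_eq_true_eq] at hdom
    exact fun y hy => hdom.2 y hy
  rw [solution_eq_loopA k t hpre hd, solution_alt_eq_loopA, solnVA_eq_solnDesc t hd]
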